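-- pv_equiv track=rewrite | github.com/SanduDS/BankStatementToManagement | backend/app/services/csv_export.py | _count_transactions_in_category
-- ===== SOURCE A (Python) =====
-- from typing import Dict, Any, List, Optional
--
-- def _count_transactions_in_category(expenses: List[Dict], target_category: str) -> int:
--     """Count transactions in a specific category"""
--     category_keywords = {
--         'Food & Dining': ['restaurant', 'food', 'meal', 'dining', 'coffee', 'pizza', 'burger', 'cafe'],
--         'Transportation': ['fuel', 'gas', 'taxi', 'uber', 'lyft', 'bus', 'train', 'parking', 'toll'],
--         'Utilities': ['electric', 'water', 'internet', 'phone', 'utility', 'bill'],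
--         'Healthcare': ['hospital', 'doctor', 'medical', 'pharmacy', 'health', 'clinic'],
--         'Shopping': ['store', 'shop', 'market', 'supermarket', 'retail', 'purchase'],
--         'Entertainment': ['movie', 'cinema', 'game', 'entertainment', 'ticket', 'concert'],
--         'Banking & Finance': ['bank', 'fee', 'charge', 'interest', 'loan', 'atm', 'withdrawal'],
--         'Bills & Payments': ['payment', 'bill', 'invoice', 'subscription', 'insurance', 'premium']
--     }
--
--     if target_category not in category_keywords:
--         # Count "Others" category
--         count = 0
--         for expense in expenses:
--             description = expense.get('description', '').lower()
--             categorized = False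
--
--             for keywords in category_keywords.values():
--                 if any(keyword in description for keyword in keywords):
--                     categorized = True
--                     break
--
--             if not categorized:
--                 count += 1
--         return count
--
--     keywords = category_keywords[target_category]
--     count = 0
--     for expense in expenses:
--         description = expense.get('description', '').lower()
--         if any(keyword in description for keyword in keywords):
--             count += 1
--
--     return count
-- ===== SOURCE B (Python) =====
-- from typing import Dict, Any, List, Optional
--
-- _CATEGORY_KEYWORDS = [
--     ('Food & Dining', ['restaurant', 'food', 'meal', 'dining', 'coffee', 'pizza', 'burger', 'cafe']),
--     ('Transportation', ['fuel', 'gas', 'taxi', 'uber', 'lyft', 'bus', 'train', 'parking', 'toll']),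
--     ('Utilities', ['electric', 'water', 'internet', 'phone', 'utility', 'bill']),
--     ('Healthcare', ['hospital', 'doctor', 'medical', 'pharmacy', 'health', 'clinic']),
--     ('Shopping', ['store', 'shop', 'market', 'supermarket', 'retail', 'purchase']),
--     ('Entertainment', ['movie', 'cinema', 'game', 'entertainment', 'ticket', 'concert']),
--     ('Banking & Finance', ['bank', 'fee', 'charge', 'interest', 'loan', 'atm', 'withdrawal']),
--     ('Bills & Payments', ['payment', 'bill', 'invoice', 'subscription', 'insurance', 'premium']),
-- ]
--
-- def _count_transactions_in_category(expenses: List[Dict], target_category: str) -> int: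
--     """One uniform pass: build per-category counts plus an Others counter, then look up."""
--     counts = {name: 0 for name, _ in _CATEGORY_KEYWORDS}
--     others = 0
--     for expense in expenses:
--         description = expense.get('description', '').lower()
--         matched = False
--         for category, keywords in _CATEGORY_KEYWORDS:
--             if any(k in description for k in keywords):
--                 counts[category] += 1
--                 matched = True
--         if not matched:
--             others += 1
--     return counts.get(target_category, others)
-- ===== Notes on version B (the rewrite author's own statement) =====
-- stated objective: alternative
-- what changed: Replaces A's target-first branching (two separate specialized loops chosen by a membership test) with one uniform pass that builds a per-category count table plus an Others counter, followed by a single dict lookup with Others as the default.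
import Mathlib
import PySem

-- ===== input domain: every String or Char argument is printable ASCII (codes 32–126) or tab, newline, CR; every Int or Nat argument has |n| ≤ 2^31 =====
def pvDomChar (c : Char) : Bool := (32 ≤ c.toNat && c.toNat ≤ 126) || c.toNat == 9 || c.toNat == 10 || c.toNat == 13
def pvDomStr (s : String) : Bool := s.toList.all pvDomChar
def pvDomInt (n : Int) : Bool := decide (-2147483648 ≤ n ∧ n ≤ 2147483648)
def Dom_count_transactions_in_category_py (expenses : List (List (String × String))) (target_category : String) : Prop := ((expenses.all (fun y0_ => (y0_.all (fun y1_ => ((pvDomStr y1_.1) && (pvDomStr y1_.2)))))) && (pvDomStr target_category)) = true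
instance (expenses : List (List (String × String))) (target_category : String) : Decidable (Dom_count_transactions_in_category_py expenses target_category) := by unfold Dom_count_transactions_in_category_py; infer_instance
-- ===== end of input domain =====

-- B replaces A's target-first branching (two specialized loops selected by a membership test) with one
-- uniform pass building a per-category count table plus an Others counter, then a single lookup (objective: alternative).

-- the module-level category_keywords table (shared data of both ports)
def pvKeywords : List (String × List String) :=
  [("Food & Dining", ["restaurant", "food", "meal", "dining", "coffee", "pizza", "burger", "cafe"]),
   ("Transportation", ["fuel", "gas", "taxi", "uber", "lyft", "bus", "train", "parking", "toll"]),
   ("Utilities", ["electric", "water", "internet", "phone", "utility", "bill"]),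
   ("Healthcare", ["hospital", "doctor", "medical", "pharmacy", "health", "clinic"]),
   ("Shopping", ["store", "shop", "market", "supermarket", "retail", "purchase"]),
   ("Entertainment", ["movie", "cinema", "game", "entertainment", "ticket", "concert"]),
   ("Banking & Finance", ["bank", "fee", "charge", "interest", "loan", "atm", "withdrawal"]),
   ("Bills & Payments", ["payment", "bill", "invoice", "subscription", "insurance", "premium"])]

-- ===== PORT A =====
def count_transactions_in_category_py (expenses : List (List (String × String))) (target_category : String) : Int :=
  if (pvKeywords.map (·.1)).contains target_category = false then
    -- Count "Others" category
    expenses.foldl (fun count expense =>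
      let description := PySem.Str.lower ((PySem.Dict.mk expense).getD "description" "")
      -- 'for keywords in values(): if any(...): categorized = True; break'
      let categorized := pvKeywords.any (fun p => p.2.any (fun keyword => PySem.Str.isIn keyword description))
      if !categorized then count + 1 else count) 0
  else
    let keywords := (List.lookup target_category pvKeywords).getD []
    expenses.foldl (fun count expense =>
      let description := PySem.Str.lower ((PySem.Dict.mk expense).getD "description" "")
      if keywords.any (fun keyword => PySem.Str.isIn keyword description) then count + 1 else count) 0

-- ===== PORT B =====
def count_transactions_in_category_py_alt (expenses : List (List (String × String))) (target_category : String) : Int :=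
  let counts0 : PySem.Dict String Int := pvKeywords.foldl (fun d p => d.insert p.1 0) PySem.Dict.empty
  let fin := expenses.foldl (fun st expense =>
      let description := PySem.Str.lower ((PySem.Dict.mk expense).getD "description" "")
      let res := pvKeywords.foldl (fun q p =>
          if p.2.any (fun k => PySem.Str.isIn k description) then (q.1.modify p.1 0 (· + 1), true) else q)
        (st.1, false)
      if res.2 then (res.1, st.2) else (res.1, st.2 + 1)) (counts0, (0 : Int))
  ((fin.1).get? target_category).getD fin.2

-- ===== PRECONDITION & SPEC =====
def Spec_count_transactions_in_category_py (expenses : List (List (String × String))) (target_category : String) (out : Int) : Prop := out = count_transactions_in_category_py_alt expenses target_category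
instance (expenses : List (List (String × String))) (target_category : String) (out : Int) : Decidable (Spec_count_transactions_in_category_py expenses target_category out) := by unfold Spec_count_transactions_in_category_py; infer_instance

-- ===== CLAIM (what is proved, stated in full; the proofs are below) =====
def Claim_equal_count_transactions_in_category_py : Prop := ∀ (expenses : List (List (String × String))) (target_category : String), Dom_count_transactions_in_category_py expenses target_category → Spec_count_transactions_in_category_py expenses target_category (count_transactions_in_category_py expenses target_category)

-- ===== LEMMAS AND PROOFS =====

-- proof-side names for the pieces of B's loop (definitionally equal to the inline code of the port)
def pvDesc (expense : List (String × String)) : String :=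
  PySem.Str.lower ((PySem.Dict.mk expense).getD "description" "")

def pvHits (keywords : List String) (expense : List (String × String)) : Bool :=
  keywords.any (fun k => PySem.Str.isIn k (pvDesc expense))

def pvHitsAny (expense : List (String × String)) : Bool :=
  pvKeywords.any (fun p => pvHits p.2 expense)

def pvInner (description : String) (q : PySem.Dict String Int × Bool) (p : String × List String) :
    PySem.Dict String Int × Bool :=
  if p.2.any (fun k => PySem.Str.isIn k description) then (q.1.modify p.1 0 (· + 1), true) else q

def pvStep (st : PySem.Dict String Int × Int) (expense : List (String × String)) :
    PySem.Dict String Int × Int :=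
  let res := pvKeywords.foldl (pvInner (pvDesc expense)) (st.1, false)
  if res.2 then (res.1, st.2) else (res.1, st.2 + 1)

def pvInit : PySem.Dict String Int := pvKeywords.foldl (fun d p => d.insert p.1 0) PySem.Dict.empty

lemma alt_eq (expenses : List (List (String × String))) (t : String) :
    count_transactions_in_category_py_alt expenses t =
      (((expenses.foldl pvStep (pvInit, 0)).1).get? t).getD (expenses.foldl pvStep (pvInit, 0)).2 := rfl

lemma inner_snd (desc : String) :
    ∀ (L : List (String × List String)) (d : PySem.Dict String Int) (b : Bool),
      (L.foldl (pvInner desc) (d, b)).2 = (b || L.any (fun p => p.2.any (fun k => PySem.Str.isIn k desc))) := by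
  intro L
  induction L with
  | nil => intro d b; simp
  | cons p L ih =>
    intro d b
    simp only [List.foldl_cons, List.any_cons, pvInner]
    split
    · rename_i h
      rw [ih, h]
      simp only [Bool.true_or, Bool.or_true]
    · rename_i h
      rw [Bool.not_eq_true] at h
      rw [ih, h]
      simp only [Bool.false_or]

lemma inner_contains_true (desc : String) (k : String) :
    ∀ (L : List (String × List String)) (d : PySem.Dict String Int) (b : Bool),
      d.contains k = true → ((L.foldl (pvInner desc) (d, b)).1).contains k = true := by
  intro L
  induction L with
  | nil => intro d b h; simpa using h
  | cons p L ih =>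
    intro d b h
    simp only [List.foldl_cons, pvInner]
    split
    · exact ih _ _ (by simp [PySem.Dict.contains_modify, h])
    · exact ih _ _ h

lemma inner_contains_not (desc : String) (k : String) :
    ∀ (L : List (String × List String)) (d : PySem.Dict String Int) (b : Bool),
      k ∉ L.map (·.1) → ((L.foldl (pvInner desc) (d, b)).1).contains k = d.contains k := by
  intro L
  induction L with
  | nil => intro d b _; simp
  | cons p L ih =>
    intro d b h
    simp only [List.map_cons, List.mem_cons, not_or] at h
    simp only [List.foldl_cons, pvInner]
    split
    · rw [ih _ _ h.2, PySem.Dict.contains_modify]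
      simp [show (k == p.1) = false by simpa using h.1]
    · exact ih _ _ h.2

lemma inner_getD_not (desc : String) (k : String) :
    ∀ (L : List (String × List String)) (d : PySem.Dict String Int) (b : Bool),
      k ∉ L.map (·.1) → ((L.foldl (pvInner desc) (d, b)).1).getD k 0 = d.getD k 0 := by
  intro L
  induction L with
  | nil => intro d b _; simp
  | cons p L ih =>
    intro d b h
    simp only [List.map_cons, List.mem_cons, not_or] at h
    simp only [List.foldl_cons, pvInner]
    split
    · rw [ih _ _ h.2, PySem.Dict.getD_modify]
      simp [h.1]
    · exact ih _ _ h.2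

lemma inner_getD_mem (desc : String) (k : String) (kws : List String) :
    ∀ (L : List (String × List String)) (d : PySem.Dict String Int) (b : Bool),
      (k, kws) ∈ L → (L.map (·.1)).Nodup →
      ((L.foldl (pvInner desc) (d, b)).1).getD k 0 =
        d.getD k 0 + (if kws.any (fun kw => PySem.Str.isIn kw desc) then 1 else 0) := by
  intro L
  induction L with
  | nil => intro d b h _; simp at h
  | cons p L ih =>
    intro d b hmem hnd
    simp only [List.map_cons, List.nodup_cons] at hnd
    rcases List.mem_cons.mp hmem with heq | htail
    · subst heq
      have hk : k ∉ L.map (·.1) := hnd.1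
      simp only [List.foldl_cons, pvInner]
      split
      · rename_i h
        rw [inner_getD_not desc k L _ _ hk, PySem.Dict.getD_modify]
        simp
      · rename_i h
        rw [Bool.not_eq_true] at h
        rw [inner_getD_not desc k L _ _ hk]
        simp
    · have hne : k ≠ p.1 := by
        intro h; rw [h] at htail
        exact hnd.1 (List.mem_map.mpr ⟨(p.1, kws), htail, rfl⟩)
      simp only [List.foldl_cons, pvInner]
      split
      · rw [ih _ _ htail hnd.2, PySem.Dict.getD_modify]
        rw [if_neg hne]
      · exact ih _ _ htail hnd.2

lemma step_eq (d : PySem.Dict String Int) (o : Int) (e : List (String × String)) :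
    pvStep (d, o) e = ((pvKeywords.foldl (pvInner (pvDesc e)) (d, false)).1,
      if pvHitsAny e then o else o + 1) := by
  have hsnd : (pvKeywords.foldl (pvInner (pvDesc e)) (d, false)).2 = pvHitsAny e := by
    rw [inner_snd]; simp [pvHitsAny, pvHits]
  simp only [pvStep, hsnd]
  by_cases hb : pvHitsAny e <;> simp [hb]

lemma outer_snd :
    ∀ (es : List (List (String × String))) (d : PySem.Dict String Int) (o : Int),
      (es.foldl pvStep (d, o)).2 = o + ((es.countP (fun e => !pvHitsAny e) : Nat) : Int) := by
  intro es
  induction es with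
  | nil => intro d o; simp
  | cons e es ih =>
    intro d o
    rw [List.foldl_cons, step_eq, ih, List.countP_cons]
    by_cases hb : pvHitsAny e <;> simp [hb] <;> push_cast <;> ring

lemma outer_contains_true (k : String) :
    ∀ (es : List (List (String × String))) (d : PySem.Dict String Int) (o : Int),
      d.contains k = true → ((es.foldl pvStep (d, o)).1).contains k = true := by
  intro es
  induction es with
  | nil => intro d o h; simpa using h
  | cons e es ih =>
    intro d o h
    rw [List.foldl_cons, step_eq]
    exact ih _ _ (inner_contains_true (pvDesc e) k pvKeywords d false h)

lemma outer_contains_not (k : String) (hk : k ∉ pvKeywords.map (·.1)) :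
    ∀ (es : List (List (String × String))) (d : PySem.Dict String Int) (o : Int),
      ((es.foldl pvStep (d, o)).1).contains k = d.contains k := by
  intro es
  induction es with
  | nil => intro d o; simp
  | cons e es ih =>
    intro d o
    rw [List.foldl_cons, step_eq, ih, inner_contains_not (pvDesc e) k pvKeywords d false hk]

lemma outer_getD (k : String) (kws : List String) (hmem : (k, kws) ∈ pvKeywords) :
    ∀ (es : List (List (String × String))) (d : PySem.Dict String Int) (o : Int),
      d.contains k = true →
      ((es.foldl pvStep (d, o)).1).getD k 0 = d.getD k 0 + ((es.countP (pvHits kws) : Nat) : Int) := by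
  intro es
  induction es with
  | nil => intro d o _; simp
  | cons e es ih =>
    intro d o h
    rw [List.foldl_cons, step_eq,
      ih _ _ (inner_contains_true (pvDesc e) k pvKeywords d false h),
      inner_getD_mem (pvDesc e) k kws pvKeywords d false hmem (by decide),
      List.countP_cons]
    have : (kws.any fun kw => PySem.Str.isIn kw (pvDesc e)) = pvHits kws e := rfl
    rw [this]
    by_cases hb : pvHits kws e <;> simp [hb] <;> push_cast <;> ring

lemma lookup_of_mem_fst {α β : Type} [BEq α] [LawfulBEq α] (t : α) :
    ∀ (l : List (α × β)), t ∈ l.map (·.1) → ∃ v, List.lookup t l = some v ∧ (t, v) ∈ l := by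
  intro l
  induction l with
  | nil => simp
  | cons p l ih =>
    intro h
    obtain ⟨a, b⟩ := p
    by_cases hk : a = t
    · subst hk
      exact ⟨b, by simp [List.lookup], by simp⟩
    · simp only [List.map_cons, List.mem_cons] at h
      rcases h with h1 | h2
      · exact absurd h1.symm hk
      · obtain ⟨v, hv, hvm⟩ := ih h2
        exact ⟨v, by simp [List.lookup, show (t == a) = false by simpa using Ne.symm hk, hv], by simp [hvm]⟩

theorem main_eq (expenses : List (List (String × String))) (target_category : String) :
    count_transactions_in_category_py expenses target_category =
      count_transactions_in_category_py_alt expenses target_category := by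
  rw [alt_eq, count_transactions_in_category_py]
  by_cases h : target_category ∈ pvKeywords.map (·.1)
  · -- target is a known category
    rw [if_neg (by simpa using h)]
    obtain ⟨kws, hlk, hmem⟩ := lookup_of_mem_fst target_category pvKeywords h
    have hinitc : pvInit.contains target_category = true := by
      rw [PySem.Dict.contains_eq_decide_mem_keys]
      simpa [show pvInit.keys = pvKeywords.map (·.1) from rfl] using h
    have hfinc : ((expenses.foldl pvStep (pvInit, 0)).1).contains target_category = true :=
      outer_contains_true target_category expenses pvInit 0 hinitc
    obtain ⟨v, hv⟩ : ∃ v, ((expenses.foldl pvStep (pvInit, 0)).1).get? target_category = some v := by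
      rw [PySem.Dict.contains_eq_isSome_get?] at hfinc
      exact Option.isSome_iff_exists.mp hfinc
    have hinit0 : pvInit.getD target_category 0 = 0 :=
      PySem.Dict.getD_of_mem_items _
        (by rw [show pvInit.items = pvKeywords.map (fun p => (p.1, (0 : Int))) from rfl];
            exact List.mem_map.mpr ⟨(target_category, kws), hmem, rfl⟩)
        (by decide) 0
    have hgetD := outer_getD target_category kws hmem expenses pvInit 0 hinitc
    rw [hinit0, zero_add] at hgetD
    have hvv : v = ((expenses.countP (pvHits kws) : Nat) : Int) := by
      rw [← hgetD, PySem.Dict.getD_eq_get?_getD, hv]; rfl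
    rw [hv, hlk]
    simp only [Option.getD_some, hvv]
    change List.foldl (fun acc e => if pvHits kws e then acc + 1 else acc) 0 expenses = _
    rw [PySem.List.foldl_count_if, zero_add]
  · -- Others
    rw [if_pos (by simpa using h)]
    have hfinc : ((expenses.foldl pvStep (pvInit, 0)).1).contains target_category = false := by
      rw [outer_contains_not target_category h expenses pvInit 0,
        PySem.Dict.contains_eq_decide_mem_keys]
      simpa [show pvInit.keys = pvKeywords.map (·.1) from rfl] using h
    rw [(PySem.Dict.get?_eq_none_iff_contains _ _).mpr hfinc]
    simp only [Option.getD_none]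
    rw [outer_snd expenses pvInit 0, zero_add]
    change List.foldl (fun acc e => if !pvHitsAny e then acc + 1 else acc) 0 expenses = _
    rw [PySem.List.foldl_count_if, zero_add]

-- ===== VERDICT (by name: the statement is the Claim_ definition above) =====
theorem count_transactions_in_category_py_spec : Claim_equal_count_transactions_in_category_py := by
  intro expenses target_category _
  unfold Spec_count_transactions_in_category_py
  exact main_eq expenses target_category
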